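-- pv_equiv track=rewrite | github.com/shima403shafiee9513/Shim.Shafiee.BioInfo | PreGAN2.py | preprocess_seq_data
-- ===== SOURCE A (Python) =====
-- def preprocess_seq_data(seq_data):
--
--     two_dimensional_array = []
--     window_size=7
--
--     for i in range(0, len(seq_data), window_size):
--
--         row = []
--
--         for j in range(window_size):
--             if i + j < len(seq_data):
--                 row.append(str(seq_data[i + j]))
--             else:
--
--                 row.append('_')
--
--         two_dimensional_array.append(row)
--
--     if len(two_dimensional_array)<18:
--         for i in range(len(two_dimensional_array),18):
--             row=["_"]*7
--             two_dimensional_array.append(row)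
--     elif len(two_dimensional_array)>=18:
--               two_dimensional_array=two_dimensional_array[0:18]
--     return  two_dimensional_array
-- ===== SOURCE B (Python) =====
-- def preprocess_seq_data(seq_data):
--     flat = [str(x) for x in seq_data][:126]
--     flat += ['_'] * (126 - len(flat))
--     return [flat[i:i + 7] for i in range(0, 126, 7)]
-- ===== Notes on version B (the rewrite author's own statement) =====
-- stated objective: simpler
-- what changed: B normalizes the data once into a flat 126-entry list (truncate with [:126], then pad with '_' to exactly 126) and reshapes it with one slicing comprehension, replacing A's nested index-guarded chunking loops plus the separate row-count patch-up (pad/truncate to 18 rows); comprehensions and slices replace A's per-index bound checks and appends.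
import Mathlib
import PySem

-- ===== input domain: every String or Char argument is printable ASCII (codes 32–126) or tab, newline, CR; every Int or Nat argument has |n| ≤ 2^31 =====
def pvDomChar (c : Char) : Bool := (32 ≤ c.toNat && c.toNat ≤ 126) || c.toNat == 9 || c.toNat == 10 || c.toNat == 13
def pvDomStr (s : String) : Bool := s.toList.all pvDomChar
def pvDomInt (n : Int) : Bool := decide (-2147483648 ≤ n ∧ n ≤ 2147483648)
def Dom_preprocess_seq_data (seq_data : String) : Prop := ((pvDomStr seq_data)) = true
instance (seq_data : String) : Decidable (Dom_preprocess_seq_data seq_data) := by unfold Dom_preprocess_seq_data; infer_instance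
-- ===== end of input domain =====

-- B builds the flat cell list once (truncate to 126, pad with '_' to 126) and reshapes it by
-- slicing into 18 rows of 7, instead of A's chunk-then-patch loops; objective: simpler.


-- ===== PORT A =====
def preprocess_seq_data (seq_data : String) : List (List String) :=
  let n : Int := PySem.Str.len seq_data
  let window_size : Int := 7
  let arr : List (List String) :=
    (PySem.List.pyRange 0 n window_size).foldl (fun acc i =>
      let row : List String :=
        (PySem.List.pyRange 0 window_size 1).foldl (fun r j =>
          if i + j < n then
            -- str(seq_data[i + j]); the guard makes the index in range, so the none arm is unreachable
            r ++ [(match PySem.Str.pyGet? seq_data (i + j) with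
                   | some c => String.ofList [c]
                   | none => "_")]
          else
            r ++ ["_"]) []
      acc ++ [row]) []
  if arr.length < 18 then
    (PySem.List.pyRange (arr.length : Int) 18 1).foldl
      (fun acc _ => acc ++ [List.replicate 7 "_"]) arr
  else
    PySem.List.slice arr (some 0) (some 18)

-- ===== PORT B =====
def preprocess_seq_data_alt (seq_data : String) : List (List String) :=
  let flat0 : List String :=
    PySem.List.slice (seq_data.toList.map (fun c => String.ofList [c])) none (some 126)
  let flat : List String := flat0 ++ List.replicate (126 - flat0.length) "_"
  (PySem.List.pyRange 0 126 7).map (fun i => PySem.List.slice flat (some i) (some (i + 7)))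

-- ===== PRECONDITION & SPEC =====
def Spec_preprocess_seq_data (seq_data : String) (out : List (List String)) : Prop := out = preprocess_seq_data_alt seq_data
instance (seq_data : String) (out : List (List String)) : Decidable (Spec_preprocess_seq_data seq_data out) := by unfold Spec_preprocess_seq_data; infer_instance

-- ===== CLAIM (what is proved, stated in full; the proofs are below) =====
def Claim_equal_preprocess_seq_data : Prop := ∀ (seq_data : String), Dom_preprocess_seq_data seq_data → Spec_preprocess_seq_data seq_data (preprocess_seq_data seq_data)

-- ===== LEMMAS AND PROOFS =====

-- cell (t, j) of the common 18×7 result, as a function of the input's character list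
def pvCell (cl : List Char) (k : Nat) : String :=
  if h : k < cl.length then String.ofList [cl[k]] else "_"

-- the common closed form both ports are proved equal to
def pvCanon (cl : List Char) : List (List String) :=
  (List.range 18).map (fun t => (List.range 7).map (fun j => pvCell cl (7 * t + j)))

theorem canonRow_blank (cl : List Char) (t : Nat) (h : cl.length ≤ 7 * t) :
    (List.range 7).map (fun j => pvCell cl (7 * t + j)) = List.replicate 7 "_" := by
  have hc : ∀ j, pvCell cl (7 * t + j) = "_" := fun j => dif_neg (by omega)
  simp [hc, List.map_const']

theorem A_eq_canon (s : String) : preprocess_seq_data s = pvCanon s.toList := by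
  unfold preprocess_seq_data
  dsimp only
  set cl := s.toList with hcl
  have hn : PySem.Str.len s = (cl.length : Int) := by simp [hcl]
  rw [hn]
  have houter : PySem.List.pyRange 0 (cl.length : Int) 7
      = (List.range ((cl.length + 6) / 7)).map (fun t => ((7 * t : Nat) : Int)) := by
    rw [PySem.List.pyRange_of_pos 0 (cl.length : Int) (by norm_num)]
    congr 1
    · funext k; push_cast; ring
    · congr 1
      have h6 : ((cl.length : Int) - 0 + 7 - 1) = ((cl.length + 6 : Nat) : Int) := by push_cast; ring
      rw [h6]
      split_ifs with h <;> omega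
  rw [houter, List.foldl_map, PySem.List.foldl_append_singleton_eq_map, List.nil_append]
  have hrow : ∀ t : Nat,
      (PySem.List.pyRange 0 7 1).foldl (fun r j =>
          if ((7 * t : Nat) : Int) + j < (cl.length : Int) then
            r ++ [(match PySem.Str.pyGet? s (((7 * t : Nat) : Int) + j) with
                   | some c => String.ofList [c]
                   | none => "_")]
          else
            r ++ ["_"]) []
      = (List.range 7).map (fun j => pvCell cl (7 * t + j)) := by
    intro t
    rw [PySem.List.pyRange_one, show ((7 : Int) - 0).toNat = 7 from rfl, List.foldl_map]
    rw [PySem.List.foldl_congr_mem (List.range 7) _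
      (fun (r : List String) (k : Nat) =>
        r ++ [if ((7 * t : Nat) : Int) + ((0 : Int) + (k : Nat)) < (cl.length : Int) then
                (match PySem.Str.pyGet? s (((7 * t : Nat) : Int) + ((0 : Int) + (k : Nat))) with
                 | some c => String.ofList [c]
                 | none => "_")
              else "_"]) []
      (by intro r k _; exact (apply_ite (fun z => r ++ [z]) _ _ _).symm)]
    rw [PySem.List.foldl_append_singleton_eq_map, List.nil_append]
    apply List.map_congr_left
    intro j hj
    simp only [List.mem_range] at hj
    have hidx : ((7 * t : Nat) : Int) + ((0 : Int) + ((j : Nat) : Int)) = ((7 * t + j : Nat) : Int) := by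
      push_cast; ring
    rw [hidx]
    by_cases hlt : 7 * t + j < cl.length
    · rw [if_pos (by exact_mod_cast hlt)]
      rw [PySem.Str.pyGet?_natCast, ← hcl, List.getElem?_eq_getElem hlt]
      simp [pvCell, hlt]
    · rw [if_neg (by exact_mod_cast hlt)]
      simp [pvCell, hlt]
  simp only [hrow]
  set K := (cl.length + 6) / 7 with hK
  have hKn : cl.length ≤ 7 * K := by omega
  by_cases h18 : K < 18
  · rw [if_pos (by simpa using h18)]
    simp only [List.length_map, List.length_range]
    rw [PySem.List.foldl_append_singleton_eq_map (fun _ => List.replicate 7 "_")]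
    rw [List.map_const', PySem.List.length_pyRange_one,
        show ((18 : Int) - ((K : Nat) : Int)).toNat = 18 - K from by omega]
    unfold pvCanon
    rw [show (18 : Nat) = K + (18 - K) from by omega, List.range_add, List.map_append, List.map_map]
    congr 1
    symm
    rw [List.eq_replicate_iff]
    constructor
    · simp
    · intro x hx
      simp only [List.mem_map, Function.comp] at hx
      obtain ⟨a, ha, rfl⟩ := hx
      have hb := canonRow_blank cl (K + a) (by omega)
      simpa using hb
  · rw [if_neg (by simpa using h18)]
    rw [PySem.List.slice_zero_start, PySem.List.slice_to _ (by norm_num),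
        show (18 : Int).toNat = 18 from rfl]
    unfold pvCanon
    rw [← List.map_take, List.take_range, show min 18 K = 18 from by omega]

theorem flat_get (cl : List Char) (k : Nat) (hk : k < 126) :
    ((cl.map (fun c => String.ofList [c])).take 126 ++
      List.replicate (126 - min 126 cl.length) "_")[k]? = some (pvCell cl k) := by
  set l := cl.map (fun c => String.ofList [c]) with hl
  have hll : l.length = cl.length := by simp [hl]
  by_cases h1 : k < (l.take 126).length
  · rw [List.getElem?_append_left h1]
    have hkc : k < cl.length := by simp [List.length_take, hll] at h1; omega
    simp [hk, hl, pvCell, hkc]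
  · rw [List.getElem?_append_right (by omega)]
    have hkc : ¬ k < cl.length := by simp [List.length_take, hll] at h1 ⊢; omega
    have hlen : (l.take 126).length = min 126 l.length := List.length_take ..
    simp [pvCell, hkc, List.getElem?_replicate]
    simp [hlen, hll] at h1 ⊢
    omega

theorem B_eq_canon (s : String) : preprocess_seq_data_alt s = pvCanon s.toList := by
  unfold preprocess_seq_data_alt pvCanon
  dsimp only
  set cl := s.toList with hcl
  have hs : ∀ (xs : List String), PySem.List.slice xs none (some (126:Int)) = xs.take 126 := by
    intro xs; rw [PySem.List.slice_to xs (by norm_num)]; rfl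
  simp only [hs]
  rw [show PySem.List.pyRange 0 126 7 = (List.range 18).map (fun t => ((7*t : Nat) : Int)) from by decide]
  rw [List.map_map]
  norm_num
  intro t ht
  have h1 : (7 * (t:Int)) = ((7*t : Nat) : Int) := by push_cast; ring
  rw [h1, show ((7*t : Nat) : Int) + 7 = ((7*t : Nat) : Int) + ((7:Nat) : Int) from by norm_num,
     PySem.List.slice_natCast_add]
  set flat := (cl.map fun c => String.ofList [c]).take 126 ++
      List.replicate (126 - min 126 cl.length) "_" with hflat
  have hfl : flat.length = 126 := by simp [hflat]
  apply List.ext_getElem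
  · simp [hfl]; omega
  · intro j hj1 hj2
    have hj : j < 7 := by simp at hj2; omega
    have hget := flat_get cl (7*t + j) (by omega)
    rw [← hflat] at hget
    rw [List.getElem?_eq_getElem (by omega)] at hget
    simp only [List.getElem_take, List.getElem_drop, List.getElem_map, List.getElem_range]
    exact Option.some.inj hget

-- ===== VERDICT (by name: the statement is the Claim_ definition above) =====
theorem preprocess_seq_data_spec : Claim_equal_preprocess_seq_data := by
  intro s _
  unfold Spec_preprocess_seq_data
  rw [A_eq_canon, B_eq_canon]
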